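-- pv_equiv track=rewrite | github.com/chlos/UC-San-Diego---Data-Structures-and-Algorithms-Specialization | course_04_strings/w04/02_suffix_array_long/suffix_array_long.py | compute_char_classes
-- ===== SOURCE A (Python) =====
-- def compute_char_classes(str_text, order_arr):
--     s_len = len(str_text)
--     res_class = [None for i in range(s_len)]
--     res_class[order_arr[0]] = 0
--     for i in range(1, s_len):
--         if str_text[order_arr[i]] != str_text[order_arr[i - 1]]:
--             res_class[order_arr[i]] = res_class[order_arr[i - 1]] + 1
--         else:
--             res_class[order_arr[i]] = res_class[order_arr[i - 1]]
--     return res_class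
-- ===== SOURCE B (Python) =====
-- def compute_char_classes(str_text, order_arr):
--     n = len(str_text)
--     res = [None] * n
--     i = 0
--     cls = 0
--     while i < n:
--         head = str_text[order_arr[i]]
--         j = i
--         while j < n and str_text[order_arr[j]] == head:
--             res[order_arr[j]] = cls
--             j += 1
--         i = j
--         cls += 1
--     return res
-- ===== Notes on version B (the rewrite author's own statement) =====
-- stated objective: alternative
-- what changed: A makes one per-index pass that reads each class back out of the mutable result array (res_class[order_arr[i-1]] + adjacent-character comparison); B instead run-length-groups the sorted positions with a two-level while loop, finding each maximal run of equal characters against the run's head character and labelling the whole run with a run counter, never reading the result array.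
-- outside the precondition, e.g. on compute_char_classes('ab', [0, 0]): A returns [0, None], B returns [0, None]
import Mathlib
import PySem

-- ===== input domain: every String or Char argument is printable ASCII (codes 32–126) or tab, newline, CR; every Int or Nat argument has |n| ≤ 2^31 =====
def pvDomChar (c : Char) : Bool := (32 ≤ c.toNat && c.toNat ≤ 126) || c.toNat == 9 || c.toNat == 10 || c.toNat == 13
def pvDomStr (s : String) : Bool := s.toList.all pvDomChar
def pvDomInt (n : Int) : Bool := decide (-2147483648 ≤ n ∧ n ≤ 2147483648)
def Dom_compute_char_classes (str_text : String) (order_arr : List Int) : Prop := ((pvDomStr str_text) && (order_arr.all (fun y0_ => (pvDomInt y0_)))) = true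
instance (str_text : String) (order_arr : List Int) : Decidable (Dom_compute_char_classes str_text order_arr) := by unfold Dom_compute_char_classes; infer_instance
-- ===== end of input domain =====

-- B replaces A's per-index pass (which reads each class back out of the mutable result array) by
-- run-length grouping: a two-level loop that finds each maximal run of equal characters and labels
-- the whole run with a run counter (objective: alternative decomposition, not speed).

-- ===== PORT A =====
-- Python's None cells are modelled as Option Int; the `.getD` defaults realize reads Python would
-- raise on (such inputs are excluded by Pre_), and the final `.map (·.getD 0)` extracts the ints
-- (under Pre_ every cell has been written, so no None survives).
def compute_char_classes (str_text : String) (order_arr : List Int) : List Int :=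
  let s_len : Nat := str_text.toList.length
  let res0 : List (Option Int) := List.replicate s_len none
  -- res_class[order_arr[0]] = 0  (IndexError when str_text or order_arr is empty: outside Pre_)
  let res1 : List (Option Int) :=
    PySem.List.pySetD res0 (PySem.List.pyGetD order_arr 0 0) (some 0)
  let resF : List (Option Int) :=
    (PySem.List.pyRange 1 (s_len : Int) 1).foldl (fun res i =>
      let oi := PySem.List.pyGetD order_arr i 0
      let op := PySem.List.pyGetD order_arr (i - 1) 0
      let prev : Int := (PySem.List.pyGetD res op none).getD 0
      if PySem.Str.pyGet? str_text oi ≠ PySem.Str.pyGet? str_text op then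
        PySem.List.pySetD res oi (some (prev + 1))
      else
        PySem.List.pySetD res oi (some prev)) res1
  resF.map (fun o => o.getD 0)

-- ===== PORT B =====
-- inner while loop of Source B: advance j while j < n and str_text[order_arr[j]] == head,
-- writing cls at each covered position; returns (final j, updated res).  The fuel argument only
-- makes the recursion structural (the caller passes n + 1 > n - j, so fuel never runs out).
def pvInnerB (str_text : String) (order_arr : List Int) (head : Option Char) (cls : Int)
    (n : Nat) : Nat → Nat → List (Option Int) → Nat × List (Option Int)
  | 0, j, res => (j, res)
  | fuel + 1, j, res =>
    if j < n ∧ PySem.Str.pyGet? str_text (PySem.List.pyGetD order_arr (j : Int) 0) = head then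
      pvInnerB str_text order_arr head cls n fuel (j + 1)
        (PySem.List.pySetD res (PySem.List.pyGetD order_arr (j : Int) 0) (some cls))
    else (j, res)

-- outer while loop of Source B (same fuel device)
def pvOuterB (str_text : String) (order_arr : List Int) (n : Nat) :
    Nat → Nat → Int → List (Option Int) → List (Option Int)
  | 0, _, _, res => res
  | fuel + 1, i, cls, res =>
    if i < n then
      let head := PySem.Str.pyGet? str_text (PySem.List.pyGetD order_arr (i : Int) 0)
      let p := pvInnerB str_text order_arr head cls n (n + 1) i res
      pvOuterB str_text order_arr n fuel p.1 (cls + 1) p.2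
    else res

def compute_char_classes_alt (str_text : String) (order_arr : List Int) : List Int :=
  let n : Nat := str_text.toList.length
  (pvOuterB str_text order_arr n (n + 1) 0 0 (List.replicate n (none : Option Int))).map
    (fun o => o.getD 0)

-- ===== PRECONDITION & SPEC =====
-- Python's negative-index wraparound: index x into a list of length n means position x + n when x < 0
def pvWrapI (n : Nat) (x : Int) : Int := if x < 0 then x + (n : Int) else x

-- Pre_ admits exactly the inputs on which A returns a list of ints: a nonempty string whose first
-- s_len order entries — read with Python's negative-index wraparound — are a permutation of the
-- positions 0..s_len-1.  Outside it both Pythons raise (empty string, short order list,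
-- out-of-range index), or A returns a list still containing None (an uncovered position — not a
-- value of the declared List Int type); see the cite in the claim.
def Pre_compute_char_classes (str_text : String) (order_arr : List Int) : Prop :=
  0 < str_text.toList.length ∧
  ((order_arr.take str_text.toList.length).map (pvWrapI str_text.toList.length)).Perm
    ((List.range str_text.toList.length).map Int.ofNat)
instance (str_text : String) (order_arr : List Int) : Decidable (Pre_compute_char_classes str_text order_arr) := by unfold Pre_compute_char_classes; infer_instance

def pvWitness_compute_char_classes : String × List Int := ("aba", [-1, 0, 1])

def Spec_compute_char_classes (str_text : String) (order_arr : List Int) (out : List Int) : Prop := out = compute_char_classes_alt str_text order_arr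
instance (str_text : String) (order_arr : List Int) (out : List Int) : Decidable (Spec_compute_char_classes str_text order_arr out) := by unfold Spec_compute_char_classes; infer_instance

-- ===== CLAIM (what is proved, stated in full; the proofs are below) =====
def Claim_equal_compute_char_classes : Prop := ∀ (str_text : String) (order_arr : List Int), Dom_compute_char_classes str_text order_arr → Pre_compute_char_classes str_text order_arr → Spec_compute_char_classes str_text order_arr (compute_char_classes str_text order_arr)

-- ===== LEMMAS AND PROOFS =====

-- order_arr[i] as an Int, for a Nat position i
def pvG (order_arr : List Int) (i : Nat) : Int := order_arr.getD i 0
-- the key of sorted position i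
def pvKey (str_text : String) (order_arr : List Int) (i : Nat) : Option Char :=
  PySem.Str.pyGet? str_text (pvG order_arr i)
-- the class of sorted position i (the common value both programs compute)
def pvR (str_text : String) (order_arr : List Int) : Nat → Int
  | 0 => 0
  | i + 1 =>
    if pvKey str_text order_arr (i + 1) ≠ pvKey str_text order_arr i
    then pvR str_text order_arr i + 1 else pvR str_text order_arr i

-- A's loop body and A's state after sorted positions 1..m-1
def pvAStep (str_text : String) (order_arr : List Int) (res : List (Option Int)) (i : Int) :
    List (Option Int) :=
  let oi := PySem.List.pyGetD order_arr i 0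
  let op := PySem.List.pyGetD order_arr (i - 1) 0
  let prev : Int := (PySem.List.pyGetD res op none).getD 0
  if PySem.Str.pyGet? str_text oi ≠ PySem.Str.pyGet? str_text op then
    PySem.List.pySetD res oi (some (prev + 1))
  else
    PySem.List.pySetD res oi (some prev)

def pvA (str_text : String) (order_arr : List Int) (m : Nat) : List (Option Int) :=
  (PySem.List.pyRange 1 (m : Int) 1).foldl (pvAStep str_text order_arr)
    (PySem.List.pySetD (List.replicate str_text.toList.length (none : Option Int))
      (PySem.List.pyGetD order_arr 0 0) (some 0))

theorem pvA_succ (str_text : String) (order_arr : List Int) (h : Nat) (hpos : 1 ≤ h) :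
    pvA str_text order_arr (h + 1) =
      pvAStep str_text order_arr (pvA str_text order_arr h) (h : Int) := by
  unfold pvA
  rw [show ((h + 1 : Nat) : Int) = (h : Int) + 1 by push_cast; ring,
    PySem.List.pyRange_one_succ_right (by exact_mod_cast hpos),
    List.foldl_append, List.foldl_cons, List.foldl_nil]

theorem pvWrapI_bounds (n : Nat) (g : Int) (h0 : -(n : Int) ≤ g) (h1 : g < (n : Int)) :
    0 ≤ pvWrapI n g ∧ (pvWrapI n g).toNat < n := by
  unfold pvWrapI; split_ifs <;> omega

theorem pvPre_len (str_text : String) (order_arr : List Int)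
    (h : Pre_compute_char_classes str_text order_arr) :
    str_text.toList.length ≤ order_arr.length := by
  have := h.2.length_eq
  rw [List.length_map, List.length_take, List.length_map, List.length_range] at this
  omega

theorem pvPre_bounds (str_text : String) (order_arr : List Int)
    (h : Pre_compute_char_classes str_text order_arr) :
    ∀ i < str_text.toList.length,
      -(str_text.toList.length : Int) ≤ pvG order_arr i ∧
        pvG order_arr i < (str_text.toList.length : Int) := by
  intro i hi
  have hlen := pvPre_len _ _ h
  have hiord : i < order_arr.length := lt_of_lt_of_le hi hlen
  have hg : pvG order_arr i = order_arr[i] := by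
    simp [pvG, List.getD_eq_getElem?_getD, List.getElem?_eq_getElem hiord]
  have hmem : order_arr[i] ∈ order_arr.take str_text.toList.length := by
    have hit : i < (order_arr.take str_text.toList.length).length := by
      rw [List.length_take]; omega
    have : order_arr[i] = (order_arr.take str_text.toList.length)[i]'hit :=
      (List.getElem_take).symm
    rw [this]; exact List.getElem_mem _
  have hwmem := List.mem_map_of_mem (f := pvWrapI str_text.toList.length) hmem
  rw [h.2.mem_iff] at hwmem
  simp only [List.mem_map, List.mem_range] at hwmem
  obtain ⟨k, hk, hke⟩ := hwmem
  rw [hg]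
  simp only [Int.ofNat_eq_natCast] at hke
  unfold pvWrapI at hke
  split_ifs at hke <;> omega

-- pySetD / pyGetD on an in-range, possibly negative index, through the wrapped position
theorem pvSetD_wrap (xs : List (Option Int)) (g : Int) (v : Option Int)
    (h0 : -(xs.length : Int) ≤ g) (h1 : g < (xs.length : Int)) :
    PySem.List.pySetD xs g v = xs.set (pvWrapI xs.length g).toNat v := by
  by_cases hneg : g < 0
  · simp only [PySem.List.pySetD, PySem.List.pySet?, PySem.List.pyIdx?]
    rw [if_neg (by omega), if_pos (by omega)]
    have hix : xs.length - (-g).toNat = (pvWrapI xs.length g).toNat := by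
      unfold pvWrapI; rw [if_pos hneg]; omega
    simp only [Option.map_some, Option.getD_some, hix]
  · rw [PySem.List.pySetD_of_nonneg _ _ (by omega)]
    have hix : g.toNat = (pvWrapI xs.length g).toNat := by
      unfold pvWrapI; rw [if_neg hneg]
    rw [hix]

theorem pvGetD_wrap (xs : List (Option Int)) (g : Int) (d : Option Int)
    (h0 : -(xs.length : Int) ≤ g) (h1 : g < (xs.length : Int)) :
    PySem.List.pyGetD xs g d = xs.getD (pvWrapI xs.length g).toNat d := by
  by_cases hneg : g < 0
  · simp only [PySem.List.pyGetD, PySem.List.pyGet?, PySem.List.pyIdx?]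
    rw [if_neg (by omega), if_pos (by omega)]
    have hix : xs.length - (-g).toNat = (pvWrapI xs.length g).toNat := by
      unfold pvWrapI; rw [if_pos hneg]; omega
    simp only [Option.bind_some, hix, List.getD_eq_getElem?_getD]
  · have hix : (pvWrapI xs.length g).toNat = g.toNat := by
      unfold pvWrapI; rw [if_neg hneg]
    rw [hix, PySem.List.pyGetD_eq_getElem xs d (by omega) h1,
      List.getD_eq_getElem?_getD, List.getElem?_eq_getElem (by omega)]
    rfl

-- reading a slot back out of the result list (both loops store and A re-reads classes this way)
theorem pvRead (n : Nat) (res : List (Option Int)) (hlen : res.length = n) (g : Int)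
    (h0 : -(n : Int) ≤ g) (h1 : g < (n : Int)) (v : Int)
    (hv : res[(pvWrapI n g).toNat]? = some (some v)) :
    (PySem.List.pyGetD res g none).getD 0 = v := by
  subst hlen
  rw [pvGetD_wrap res g none h0 h1, List.getD_eq_getElem?_getD, hv]
  rfl

theorem pvSet_self (n : Nat) (res : List (Option Int)) (hlen : res.length = n) (g : Int)
    (h0 : -(n : Int) ≤ g) (h1 : g < (n : Int)) (v : Option Int) :
    (PySem.List.pySetD res g v)[(pvWrapI n g).toNat]? = some v := by
  subst hlen
  rw [pvSetD_wrap res g v h0 h1]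
  exact List.getElem?_set_self (pvWrapI_bounds res.length g h0 h1).2

-- A's step at index j ≥ 1, expressed through pvG/pvKey/pvR
theorem pvAStep_eq (str_text : String) (order_arr : List Int) (res : List (Option Int))
    (j : Nat) (hj : 1 ≤ j) (cls : Int) (hcls : cls = pvR str_text order_arr (j - 1))
    (hlen : res.length = str_text.toList.length)
    (hjn : j < str_text.toList.length)
    (hpre : Pre_compute_char_classes str_text order_arr)
    (hslot : res[(pvWrapI str_text.toList.length (pvG order_arr (j - 1))).toNat]? =
      some (some cls)) :
    pvAStep str_text order_arr res (j : Int) =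
      PySem.List.pySetD res (pvG order_arr j) (some (pvR str_text order_arr j)) := by
  obtain ⟨hb0, hb1⟩ := pvPre_bounds _ _ hpre (j - 1) (by omega)
  simp only [pvAStep]
  have hgj : PySem.List.pyGetD order_arr (j : Int) 0 = pvG order_arr j := by
    rw [PySem.List.pyGetD_natCast]; rfl
  have hcast : ((j : Int) - 1) = ((j - 1 : Nat) : Int) := by omega
  have hgp : PySem.List.pyGetD order_arr ((j : Int) - 1) 0 = pvG order_arr (j - 1) := by
    rw [hcast, PySem.List.pyGetD_natCast]; rfl
  rw [hgj, hgp, pvRead str_text.toList.length res hlen _ hb0 hb1 cls hslot]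
  have hre : j - 1 + 1 = j := by omega
  by_cases hk : pvKey str_text order_arr j ≠ pvKey str_text order_arr (j - 1)
  · rw [if_pos (by exact hk), hcls]
    congr 1
    conv_rhs => rw [← hre]
    simp only [pvR, hre, hk, ne_eq, not_false_eq_true, if_true]
  · rw [if_neg (by exact hk), hcls]
    congr 2
    simp only [ne_eq, not_not] at hk
    conv_rhs => rw [← hre]
    simp [pvR, hre, hk]

-- inner-loop invariant: entering pvInnerB at a position j (1 ≤ j ≤ n) inside a run whose head key
-- is `head`, with res = A's state after positions < j and cls the class stored at slot j-1, the
-- loop ends at the run boundary j' with res = A's state after positions < j'.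
theorem pvInnerB_eq (str_text : String) (order_arr : List Int)
    (hpre : Pre_compute_char_classes str_text order_arr) :
    ∀ fuel j res cls head, str_text.toList.length - j < fuel → 1 ≤ j →
      j ≤ str_text.toList.length →
      res = pvA str_text order_arr j →
      pvKey str_text order_arr (j - 1) = head →
      cls = pvR str_text order_arr (j - 1) →
      res[(pvWrapI str_text.toList.length (pvG order_arr (j - 1))).toNat]? = some (some cls) →
      res.length = str_text.toList.length →
      (let p := pvInnerB str_text order_arr head cls str_text.toList.length fuel j res
       j ≤ p.1 ∧ p.1 ≤ str_text.toList.length ∧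
        p.2 = pvA str_text order_arr p.1 ∧
        (p.1 < str_text.toList.length →
          pvKey str_text order_arr p.1 ≠ pvKey str_text order_arr (p.1 - 1)) ∧
        pvKey str_text order_arr (p.1 - 1) = head ∧
        cls = pvR str_text order_arr (p.1 - 1) ∧
        p.2[(pvWrapI str_text.toList.length (pvG order_arr (p.1 - 1))).toNat]? =
          some (some cls) ∧
        p.2.length = str_text.toList.length) := by
  intro fuel
  induction fuel with
  | zero => intro j _ _ _ hf; omega
  | succ fuel ih =>
    intro j res cls head hf hj1 hjn hres hhead hcls hslot hlen
    rw [pvInnerB]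
    by_cases hc : j < str_text.toList.length ∧
        PySem.Str.pyGet? str_text (PySem.List.pyGetD order_arr (j : Int) 0) = head
    · rw [if_pos hc]
      obtain ⟨hjlt, hkey⟩ := hc
      have hgj : PySem.List.pyGetD order_arr (j : Int) 0 = pvG order_arr j := by
        rw [PySem.List.pyGetD_natCast]; rfl
      have hkj : pvKey str_text order_arr j = pvKey str_text order_arr (j - 1) := by
        rw [hhead]; rw [← hkey, pvKey, hgj]
      have hre : j - 1 + 1 = j := by omega
      have hRj : pvR str_text order_arr j = cls := by
        rw [hcls]
        conv_lhs => rw [← hre]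
        simp [pvR, hre, hkj]
      obtain ⟨hb0, hb1⟩ := pvPre_bounds _ _ hpre j hjlt
      have hstep : PySem.List.pySetD res (PySem.List.pyGetD order_arr (j : Int) 0) (some cls) =
          pvA str_text order_arr (j + 1) := by
        rw [pvA_succ _ _ _ hj1, ← hres,
          pvAStep_eq str_text order_arr res j hj1 cls hcls hlen hjlt hpre hslot, hgj, hRj]
      have := ih (j + 1)
        (PySem.List.pySetD res (PySem.List.pyGetD order_arr (j : Int) 0) (some cls)) cls head
        (by omega) (by omega) (by omega) hstep
        (by simpa using hkj.trans hhead) (by simpa using hcls.trans (by rw [hRj, hcls]))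
        (by rw [hgj]
            simpa using pvSet_self str_text.toList.length res hlen (pvG order_arr j)
              hb0 hb1 (some cls))
        (by rw [PySem.List.length_pySetD, hlen])
      refine ⟨by omega, this.2.1, this.2.2.1, this.2.2.2.1, this.2.2.2.2.1,
        this.2.2.2.2.2.1, this.2.2.2.2.2.2⟩
    · rw [if_neg hc]
      refine ⟨le_refl j, hjn, hres, ?_, hhead, hcls, hslot, hlen⟩
      intro hjlt hkj
      apply hc
      refine ⟨hjlt, ?_⟩
      have hgj : PySem.List.pyGetD order_arr (j : Int) 0 = pvG order_arr j := by
        rw [PySem.List.pyGetD_natCast]; rfl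
      rw [hgj]
      calc PySem.Str.pyGet? str_text (pvG order_arr j)
          = pvKey str_text order_arr j := rfl
        _ = pvKey str_text order_arr (j - 1) := hkj
        _ = head := hhead

-- outer-loop invariant: at a run boundary i (res = A's state after positions < i, cls is the next
-- class to hand out) the rest of the outer loop produces A's final state.
theorem pvOuterB_eq (str_text : String) (order_arr : List Int)
    (hpre : Pre_compute_char_classes str_text order_arr) :
    ∀ fuel i res cls, str_text.toList.length - i < fuel → 1 ≤ i →
      i ≤ str_text.toList.length →
      res = pvA str_text order_arr i →
      (i < str_text.toList.length →
        pvKey str_text order_arr i ≠ pvKey str_text order_arr (i - 1)) →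
      cls = pvR str_text order_arr (i - 1) + 1 →
      res[(pvWrapI str_text.toList.length (pvG order_arr (i - 1))).toNat]? =
        some (some (pvR str_text order_arr (i - 1))) →
      res.length = str_text.toList.length →
      pvOuterB str_text order_arr str_text.toList.length fuel i cls res =
        pvA str_text order_arr str_text.toList.length := by
  intro fuel
  induction fuel with
  | zero => intro i _ _ hf; omega
  | succ fuel ih =>
    intro i res cls hf hi1 hin hres hbound hcls hslot hlen
    rw [pvOuterB]
    by_cases hc : i < str_text.toList.length
    · rw [if_pos hc]
      simp only []
      obtain ⟨hb0, hb1⟩ := pvPre_bounds _ _ hpre i hc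
      have hgi : PySem.List.pyGetD order_arr (i : Int) 0 = pvG order_arr i := by
        rw [PySem.List.pyGetD_natCast]; rfl
      -- the first inner iteration (j = i, key equals head by definition) writes class cls at slot i
      have hone : pvInnerB str_text order_arr
          (PySem.Str.pyGet? str_text (PySem.List.pyGetD order_arr (i : Int) 0)) cls
          str_text.toList.length (str_text.toList.length + 1) i res =
        pvInnerB str_text order_arr
          (PySem.Str.pyGet? str_text (PySem.List.pyGetD order_arr (i : Int) 0)) cls
          str_text.toList.length str_text.toList.length (i + 1)
          (PySem.List.pySetD res (PySem.List.pyGetD order_arr (i : Int) 0) (some cls)) := by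
        rw [pvInnerB, if_pos ⟨hc, rfl⟩]
      have hRi : pvR str_text order_arr i = cls := by
        have hre : i - 1 + 1 = i := by omega
        rw [hcls]
        conv_lhs => rw [← hre]
        simp only [pvR, hre]
        rw [if_pos (hbound hc)]
      have hstep : PySem.List.pySetD res (PySem.List.pyGetD order_arr (i : Int) 0) (some cls) =
          pvA str_text order_arr (i + 1) := by
        rw [pvA_succ _ _ _ hi1, ← hres,
          pvAStep_eq str_text order_arr res i hi1 (pvR str_text order_arr (i - 1))
            rfl hlen hc hpre hslot, hgi]
        congr 2
        have hre : i - 1 + 1 = i := by omega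
        conv_rhs => rw [← hre]
        simp only [pvR, hre]
        rw [if_pos (hbound hc)]
        omega
      have hinner := pvInnerB_eq str_text order_arr hpre str_text.toList.length (i + 1)
        (PySem.List.pySetD res (PySem.List.pyGetD order_arr (i : Int) 0) (some cls)) cls
        (PySem.Str.pyGet? str_text (PySem.List.pyGetD order_arr (i : Int) 0))
        (by omega) (by omega) (by omega) hstep
        (by simp only [Nat.add_sub_cancel]; rw [pvKey, ← hgi])
        (by simp only [Nat.add_sub_cancel]; rw [hRi])
        (by simp only [Nat.add_sub_cancel]; rw [hgi]
            exact pvSet_self str_text.toList.length res hlen (pvG order_arr i)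
              hb0 hb1 (some cls))
        (by rw [PySem.List.length_pySetD, hlen])
      rw [hone]
      set p := pvInnerB str_text order_arr
        (PySem.Str.pyGet? str_text (PySem.List.pyGetD order_arr (i : Int) 0)) cls
        str_text.toList.length str_text.toList.length (i + 1)
        (PySem.List.pySetD res (PySem.List.pyGetD order_arr (i : Int) 0) (some cls)) with hp
      obtain ⟨hge, hle, hres', hbound', _, hcls', hslot', hlen'⟩ := hinner
      exact ih p.1 p.2 (cls + 1) (by omega) (by omega) hle hres' hbound'
        (by rw [hcls']) (by rw [← hcls']; exact hslot') hlen'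
    · rw [if_neg hc]
      have : i = str_text.toList.length := by omega
      rw [hres, this]

-- ===== VERDICT (by name: the statement is the Claim_ definition above) =====
theorem compute_char_classes_spec : Claim_equal_compute_char_classes := by
  intro str_text order_arr _ hpre
  unfold Spec_compute_char_classes
  have hn : 1 ≤ str_text.toList.length := hpre.1
  obtain ⟨hb0, hb1⟩ := pvPre_bounds _ _ hpre 0 hn
  show (pvA str_text order_arr str_text.toList.length).map (fun o => o.getD 0) =
    (pvOuterB str_text order_arr str_text.toList.length (str_text.toList.length + 1) 0 0
      (List.replicate str_text.toList.length (none : Option Int))).map (fun o => o.getD 0)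
  congr 1
  -- unfold the first outer iteration and its first inner step by hand
  rw [pvOuterB, if_pos (by omega)]
  simp only []
  rw [pvInnerB, if_pos ⟨by omega, rfl⟩]
  have hgz : PySem.List.pyGetD order_arr ((0 : Nat) : Int) 0 = pvG order_arr 0 := by
    rw [PySem.List.pyGetD_natCast]; rfl
  have hA1 : PySem.List.pySetD (List.replicate str_text.toList.length (none : Option Int))
      (PySem.List.pyGetD order_arr ((0 : Nat) : Int) 0) (some 0) = pvA str_text order_arr 1 := by
    unfold pvA
    rw [show ((1 : Nat) : Int) = 1 by norm_num,
      PySem.List.pyRange_one_eq_nil (by norm_num), List.foldl_nil]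
    rfl
  have hlen1 : (PySem.List.pySetD (List.replicate str_text.toList.length (none : Option Int))
      (PySem.List.pyGetD order_arr ((0 : Nat) : Int) 0) (some 0)).length =
      str_text.toList.length := by
    rw [PySem.List.length_pySetD]; simp
  have hinner := pvInnerB_eq str_text order_arr hpre str_text.toList.length 1
    (PySem.List.pySetD (List.replicate str_text.toList.length (none : Option Int))
      (PySem.List.pyGetD order_arr ((0 : Nat) : Int) 0) (some 0)) 0
    (PySem.Str.pyGet? str_text (PySem.List.pyGetD order_arr ((0 : Nat) : Int) 0))
    (by omega) (le_refl 1) hn hA1.symm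
    (by simp only [Nat.sub_self]; rw [pvKey, ← hgz])
    (by simp [pvR])
    (by simp only [Nat.sub_self]
        rw [hgz]
        exact pvSet_self str_text.toList.length
          (List.replicate str_text.toList.length (none : Option Int)) (by simp)
          (pvG order_arr 0) hb0 hb1 (some 0))
    hlen1
  set p := pvInnerB str_text order_arr
    (PySem.Str.pyGet? str_text (PySem.List.pyGetD order_arr ((0 : Nat) : Int) 0)) 0
    str_text.toList.length str_text.toList.length 1
    (PySem.List.pySetD (List.replicate str_text.toList.length (none : Option Int))
      (PySem.List.pyGetD order_arr ((0 : Nat) : Int) 0) (some 0)) with hp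
  obtain ⟨hge, hle, hres', hbound', _, hcls', hslot', hlen'⟩ := hinner
  rw [pvOuterB_eq str_text order_arr hpre str_text.toList.length p.1 p.2 (0 + 1)
    (by omega) (by omega) hle hres' hbound' (by rw [← hcls']) (by rw [← hcls']; exact hslot')
    hlen']
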